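-- pv_equiv track=rewrite | github.com/riju-talk/MineMEETS | agents/qa_agent.py | _is_generic_answer
-- ===== SOURCE A (Python) =====
-- def _is_generic_answer(answer: str) -> bool:
--     """Check if the answer is too generic or indicates no information."""
--     generic_phrases = [
--         "i don't know", "no information", "not mentioned", "not discussed",
--         "the context doesn't", "based on the provided", "limited information",
--         "i cannot answer", "unable to provide"
--     ]
--     answer_lower = answer.lower()
--     return any(phrase in answer_lower for phrase in generic_phrases)
-- ===== SOURCE B (Python) =====
-- def _is_generic_answer(answer: str) -> bool:
--     """Check if the answer is too generic or indicates no information."""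
--     generic_phrases = [
--         "i don't know", "no information", "not mentioned", "not discussed",
--         "the context doesn't", "based on the provided", "limited information",
--         "i cannot answer", "unable to provide"
--     ]
--     s = answer.lower()
--     # single left-to-right pass over positions: at each index test whether
--     # any phrase starts there, instead of a separate substring scan per phrase
--     return any(s.startswith(p, i) for i in range(len(s)) for p in generic_phrases)
-- ===== Notes on version B (the rewrite author's own statement) =====
-- stated objective: alternative
-- what changed: B makes one left-to-right pass over the lowered text, testing at each position whether any phrase starts there, instead of A's separate full substring scan per phrase.
import Mathlib
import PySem

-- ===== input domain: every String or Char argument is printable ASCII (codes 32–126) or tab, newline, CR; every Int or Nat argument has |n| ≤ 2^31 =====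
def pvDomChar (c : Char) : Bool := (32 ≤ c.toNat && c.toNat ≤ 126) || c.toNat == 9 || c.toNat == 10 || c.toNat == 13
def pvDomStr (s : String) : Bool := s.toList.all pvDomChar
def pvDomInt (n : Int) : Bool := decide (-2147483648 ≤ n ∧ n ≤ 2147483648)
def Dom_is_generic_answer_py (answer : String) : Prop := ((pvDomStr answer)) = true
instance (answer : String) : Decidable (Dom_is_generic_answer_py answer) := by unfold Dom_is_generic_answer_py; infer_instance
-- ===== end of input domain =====

-- B scans the lowered text position by position, testing each phrase as a prefix there, instead of one substring scan per phrase (alternative traversal, same cost class).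

def genericPhrases : List String :=
  ["i don't know", "no information", "not mentioned", "not discussed",
   "the context doesn't", "based on the provided", "limited information",
   "i cannot answer", "unable to provide"]

-- ===== PORT A =====
def is_generic_answer_py (answer : String) : Bool :=
  let answer_lower := PySem.Str.lower answer
  genericPhrases.any (fun phrase => PySem.Str.isIn phrase answer_lower)

-- ===== PORT B =====
def is_generic_answer_py_alt (answer : String) : Bool :=
  let s := PySem.Str.lower answer
  -- for i in range(len(s)): any(s.startswith(p, i) for p in generic_phrases)
  (List.range s.toList.length).any
    (fun i => genericPhrases.any (fun p => PySem.Chars.startswith (s.toList.drop i) p.toList))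

-- ===== PRECONDITION & SPEC =====
def Spec_is_generic_answer_py (answer : String) (out : Bool) : Prop := out = is_generic_answer_py_alt answer
instance (answer : String) (out : Bool) : Decidable (Spec_is_generic_answer_py answer out) := by unfold Spec_is_generic_answer_py; infer_instance

-- ===== CLAIM (what is proved, stated in full; the proofs are below) =====
def Claim_equal_is_generic_answer_py : Prop := ∀ (answer : String), Dom_is_generic_answer_py answer → Spec_is_generic_answer_py answer (is_generic_answer_py answer)

-- ===== LEMMAS AND PROOFS =====

-- for a nonempty phrase, "it is a prefix at some in-range position" ↔ "it is a substring"
theorem posScan_iff (cs p : List Char) (hp : p ≠ []) :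
    (∃ i, i < cs.length ∧ PySem.Chars.startswith (cs.drop i) p = true)
      ↔ PySem.Chars.isIn p cs = true := by
  rw [← PySem.Chars.exists_prefix_drop_iff_isIn]
  constructor
  · rintro ⟨i, _, hsw⟩
    exact ⟨i, (PySem.Chars.startswith_iff _ _).mp hsw⟩
  · rintro ⟨j, hj⟩
    have hjlt : j < cs.length := by
      by_contra hge
      push Not at hge
      rw [List.drop_eq_nil_of_le hge] at hj
      exact hp (List.prefix_nil.mp hj)
    exact ⟨j, hjlt, (PySem.Chars.startswith_iff _ _).mpr hj⟩

theorem genericPhrases_ne (p : String) (hp : p ∈ genericPhrases) : p.toList ≠ [] := by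
  simp only [genericPhrases, List.mem_cons, List.not_mem_nil, or_false] at hp
  rcases hp with h|h|h|h|h|h|h|h|h <;> subst h <;> decide

-- ===== VERDICT (by name: the statement is the Claim_ definition above) =====
theorem is_generic_answer_py_spec : Claim_equal_is_generic_answer_py := by
  intro answer _
  unfold Spec_is_generic_answer_py
  simp only [is_generic_answer_py, is_generic_answer_py_alt]
  rw [Bool.eq_iff_iff]
  simp only [List.any_eq_true, List.mem_range, PySem.Str.isIn_eq]
  constructor
  · rintro ⟨p, hp, hin⟩
    obtain ⟨i, hi, hsw⟩ :=
      (posScan_iff _ _ (genericPhrases_ne _ hp)).mpr hin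
    exact ⟨i, hi, p, hp, hsw⟩
  · rintro ⟨i, hi, p, hp, hsw⟩
    exact ⟨p, hp, (posScan_iff _ _ (genericPhrases_ne _ hp)).mp ⟨i, hi, hsw⟩⟩
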